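-- pv_equiv track=rewrite | github.com/daniel-reich/turbo-robot | o7LPd9dAE5x9k7zFj_20.py | logarithm
-- ===== SOURCE A (Python) =====
-- def logarithm(base, num):
--   bad_base = [-1, 0, 1]
--   if base in bad_base:
--     return "Invalid"
--
--   if num <= 0:
--     return "Invalid"
--
--   for exp in range(100):
--     if base ** exp == num:
--       return exp
-- ===== SOURCE B (Python) =====
-- def logarithm(base, num):
--     bad_base = [-1, 0, 1]
--     if base in bad_base:
--         return "Invalid"
--     if num <= 0:
--         return "Invalid"
--     v, count = num, 0
--     for _ in range(100):
--         if v == 1: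
--             return count
--         if v % base != 0:
--             return None
--         v //= base
--         count += 1
-- ===== Notes on version B (the rewrite author's own statement) =====
-- stated objective: alternative
-- what changed: Replaces the scan over exp in range(100) that recomputes base**exp each step by repeated exact division of num by base (v //= base with a divisibility check), keeping the same 100-iteration cap and both Invalid guards.
-- outside the precondition, e.g. on logarithm(1, 8): A returns 'Invalid', B returns 'Invalid'; on logarithm(2, -4): A returns 'Invalid', B returns 'Invalid'
import Mathlib
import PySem

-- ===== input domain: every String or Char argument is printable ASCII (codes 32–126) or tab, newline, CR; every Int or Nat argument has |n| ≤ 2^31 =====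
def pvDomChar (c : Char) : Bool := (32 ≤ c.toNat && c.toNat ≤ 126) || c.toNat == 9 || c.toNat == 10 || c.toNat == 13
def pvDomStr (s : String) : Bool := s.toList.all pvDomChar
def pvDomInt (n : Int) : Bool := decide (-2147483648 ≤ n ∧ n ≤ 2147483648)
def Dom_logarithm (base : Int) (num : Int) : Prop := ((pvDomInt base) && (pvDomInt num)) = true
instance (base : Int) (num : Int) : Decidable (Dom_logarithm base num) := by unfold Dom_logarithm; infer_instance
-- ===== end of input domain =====

-- B replaces A's scan over exp in range(100) recomputing base**exp by repeated exact division of num by base, under the same 100-step cap.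


-- ===== PORT A =====
-- the 'for exp in range(100): if base ** exp == num: return exp' loop, falling through to None
def logAgo (base : Int) (num : Int) : List Int → Option Int
  | [] => none
  | e :: rest => if base ^ e.toNat = num then some e else logAgo base num rest

def logarithm (base : Int) (num : Int) : Option Int :=
  if base = -1 ∨ base = 0 ∨ base = 1 then none      -- Python returns the string "Invalid" here: outside Option Int, excluded by Pre_
  else if num ≤ 0 then none                          -- likewise "Invalid"
  else logAgo base num (PySem.List.pyRange 0 100 1)

-- ===== PORT B =====
-- the 'for _ in range(100): if v == 1: return count; if v % base != 0: return None; v //= base; count += 1' loop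
def logBgo (base : Int) : Nat → Int → Int → Option Int
  | 0, _, _ => none
  | f + 1, v, count =>
    if v = 1 then some count
    else if PySem.Int.mod v base ≠ 0 then none
    else logBgo base f (PySem.Int.floordiv v base) (count + 1)

def logarithm_alt (base : Int) (num : Int) : Option Int :=
  if base = -1 ∨ base = 0 ∨ base = 1 then none      -- "Invalid" in Python, excluded by Pre_
  else if num ≤ 0 then none                          -- "Invalid" in Python, excluded by Pre_
  else logBgo base 100 num 0

-- ===== PRECONDITION & SPEC =====
-- Pre_ excludes exactly the inputs on which A returns the string "Invalid", which is not a value of the declared Option Int type.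
def Pre_logarithm (base : Int) (num : Int) : Prop :=
  base ≠ -1 ∧ base ≠ 0 ∧ base ≠ 1 ∧ 0 < num
instance (base : Int) (num : Int) : Decidable (Pre_logarithm base num) := by unfold Pre_logarithm; infer_instance
def pvWitness_logarithm : Int × Int := (2, 8)

def Spec_logarithm (base : Int) (num : Int) (out : Option Int) : Prop := out = logarithm_alt base num
instance (base : Int) (num : Int) (out : Option Int) : Decidable (Spec_logarithm base num out) := by unfold Spec_logarithm; infer_instance

-- ===== CLAIM (what is proved, stated in full; the proofs are below) =====
def Claim_equal_logarithm : Prop := ∀ (base : Int) (num : Int), Dom_logarithm base num → Pre_logarithm base num → Spec_logarithm base num (logarithm base num)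

-- ===== LEMMAS AND PROOFS =====

-- with |base| ≥ 2, exponents are recoverable from powers
theorem pv_pow_inj {base : Int} (hb : 2 ≤ base.natAbs) {j k : Nat}
    (h : base ^ j = base ^ k) : j = k := by
  have : base.natAbs ^ j = base.natAbs ^ k := by
    rw [← Int.natAbs_pow, ← Int.natAbs_pow, h]
  exact Nat.pow_right_injective hb this

theorem logAgo_none (base num : Int) (l : List Int)
    (h : ∀ e ∈ l, base ^ e.toNat ≠ num) : logAgo base num l = none := by
  induction l with
  | nil => rfl
  | cons e rest ih =>
    simp only [logAgo, if_neg (h e (by simp))]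
    exact ih (fun x hx => h x (by simp [hx]))

theorem logAgo_some (base num : Int) (l : List Int) (k : Int)
    (hk : k ∈ l) (hpow : base ^ k.toNat = num)
    (huniq : ∀ j ∈ l, base ^ j.toNat = num → j = k) : logAgo base num l = some k := by
  induction l with
  | nil => cases hk
  | cons e rest ih =>
    by_cases he : base ^ e.toNat = num
    · have : e = k := huniq e (by simp) he
      rw [← this]; simp [logAgo, he]
    · simp only [logAgo, if_neg he]
      have hk' : k ∈ rest := by
        rcases List.mem_cons.mp hk with h | h
        · exact absurd (h ▸ hpow) he
        · exact h
      exact ih hk' (fun j hj hp => huniq j (by simp [hj]) hp)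

theorem logBgo_reach (base : Int) (hb : 2 ≤ base.natAbs) :
    ∀ (f e : Nat) (c : Int), e < f → logBgo base f (base ^ e) c = some (c + e) := by
  intro f
  induction f with
  | zero => intro e c h; omega
  | succ f ih =>
    intro e c h
    cases e with
    | zero => simp [logBgo]
    | succ e =>
      have hne : base ^ (e + 1) ≠ 1 := by
        intro h1
        have := pv_pow_inj hb (h1.trans (pow_zero base).symm)
        omega
      have hdvd : base ∣ base ^ (e + 1) := dvd_pow_self base (by omega)
      have hmod : PySem.Int.mod (base ^ (e + 1)) base = 0 :=
        (PySem.Int.mod_eq_zero_iff_dvd _ _).mpr hdvd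
      have hbne : base ≠ 0 := by
        intro h0; rw [h0] at hb; simp at hb
      have hdiv : PySem.Int.floordiv (base ^ (e + 1)) base = base ^ e := by
        have := PySem.Int.floordiv_mul_add_mod (base ^ (e + 1)) base
        rw [hmod, add_zero] at this
        have : PySem.Int.floordiv (base ^ (e + 1)) base * base = base ^ e * base := by
          rw [this]; ring
        exact mul_right_cancel₀ hbne this
      have hcond : ¬ (PySem.Int.mod (base ^ (e + 1)) base ≠ 0) := by simp [hmod]
      simp only [logBgo, if_neg hne, if_neg hcond, hdiv]
      rw [ih e (c + 1) (by omega)]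
      congr 1
      push_cast
      ring

theorem logBgo_none (base : Int) :
    ∀ (f : Nat) (v c : Int), (∀ e : Nat, e < f → base ^ e ≠ v) → logBgo base f v c = none := by
  intro f
  induction f with
  | zero => intro v c _; rfl
  | succ f ih =>
    intro v c h
    have hv1 : v ≠ 1 := by
      intro h1
      exact h 0 (by omega) (by simp [h1])
    simp only [logBgo, if_neg hv1]
    by_cases hmod : PySem.Int.mod v base = 0
    · have hcond : ¬ (PySem.Int.mod v base ≠ 0) := by simp [hmod]
      simp only [if_neg hcond]
      apply ih
      intro e he hpow
      have hv : PySem.Int.floordiv v base * base + 0 = v := by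
        rw [← hmod]; exact PySem.Int.floordiv_mul_add_mod v base
      apply h (e + 1) (by omega)
      rw [pow_succ, hpow]
      omega
    · simp [hmod]

theorem logarithm_eq (base num : Int) (hpre : Pre_logarithm base num) :
    logarithm base num = logarithm_alt base num := by
  obtain ⟨h1, h2, h3, h4⟩ := hpre
  have hguard : ¬ (base = -1 ∨ base = 0 ∨ base = 1) := by tauto
  have hnum : ¬ num ≤ 0 := by omega
  have hb : 2 ≤ base.natAbs := by
    rcases Int.natAbs_eq base with h | h <;> omega
  simp only [logarithm, logarithm_alt, if_neg hguard, if_neg hnum]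
  by_cases hex : ∃ e : Nat, e < 100 ∧ base ^ e = num
  · obtain ⟨e, he, hpow⟩ := hex
    rw [logAgo_some base num _ (e : Int)
        ((PySem.List.mem_pyRange_one).mpr (by constructor <;> omega))
        (by simpa using hpow)
        (by
          intro j hj hjp
          have hj' := (PySem.List.mem_pyRange_one).mp hj
          have hj0 : 0 ≤ j := hj'.1
          have : j.toNat = e := pv_pow_inj hb (hjp.trans hpow.symm)
          omega)]
    rw [← hpow, logBgo_reach base hb 100 e 0 he, zero_add]
  · rw [logAgo_none base num _ (by
      intro j hj hjp
      have hj' := (PySem.List.mem_pyRange_one).mp hj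
      exact hex ⟨j.toNat, by omega, hjp⟩)]
    rw [logBgo_none base 100 num 0 (fun e he hp => hex ⟨e, he, hp⟩)]

-- ===== VERDICT (by name: the statement is the Claim_ definition above) =====
theorem logarithm_spec : Claim_equal_logarithm := by
  intro base num _ hpre
  exact logarithm_eq base num hpre
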